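-- pv_equiv track=rewrite | github.com/thuylinh-uit/Artificial-Intelligent | Vương Hạo/rules.py | convert
-- ===== SOURCE A (Python) =====
-- import string
--
-- clause = {
-- 	1:"a",
-- 	2:"b",
-- 	3:"c",
-- 	4:"d",
-- 	5:"e",
-- 	6:"f",
-- 	7:"g",
-- 	8:"h",
-- 	9:"i",
-- 	10:"j",
-- 	11:"k",
-- 	12:"l",
-- 	13:"m",
-- 	14:"n",
-- 	15:"o",
-- 	16:"p",
-- 	17:"q",
-- 	18:"s",
-- 	19:"r",
-- 	20:"s",
-- 	21:"t",
-- 	22:"v",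
-- 	23:"x",
-- 	24:"y",
-- 	25:"z",
-- 	26:"w",
--
-- }
--
-- def convert(raw_data):
-- 	data = str(raw_data)
-- 	while data.find("and") != -1: data = data.replace("and", "!", 1)
-- 	while data.find("or") != -1: data = data.replace("or", "@", 1)
-- 	while data.find("not") != -1: data = data.replace("not", "#", 1)
-- 	foo = 1
-- 	change = dict()
-- 	for i in range(len(data)):
-- 		if data[i] in string.ascii_lowercase:
-- 			if data[i] not in change:
-- 				change[data[i]] = clause[foo]
-- 				foo += 1
-- 			data = data[0:i] + change[data[i]] + data[i + 1:len(data)]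
-- 	while data.find("!") != -1: data = data.replace("!", "and", 1)
-- 	while data.find("@") != -1: data = data.replace("@", "or", 1)
-- 	while data.find("#") != -1: data = data.replace("#", "not", 1)
-- 	return data
-- ===== SOURCE B (Python) =====
-- import string
--
-- clause = {
--     1: "a", 2: "b", 3: "c", 4: "d", 5: "e", 6: "f", 7: "g", 8: "h", 9: "i",
--     10: "j", 11: "k", 12: "l", 13: "m", 14: "n", 15: "o", 16: "p", 17: "q",
--     18: "s", 19: "r", 20: "s", 21: "t", 22: "v", 23: "x", 24: "y", 25: "z",
--     26: "w",
-- }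
--
-- def convert(raw_data):
--     data = str(raw_data).replace("and", "!").replace("or", "@").replace("not", "#")
--     seen = dict.fromkeys(c for c in data if c in string.ascii_lowercase)
--     table = {c: clause[i + 1] for i, c in enumerate(seen)}
--     data = data.translate(str.maketrans(table))
--     return data.replace("!", "and").replace("@", "or").replace("#", "not")
-- ===== Notes on version B (the rewrite author's own statement) =====
-- stated objective: faster
-- what changed: A repeatedly single-replaces keywords in find-loops and remaps letters with an interleaved per-index detect-and-rebuild slice loop that grows the mapping as it rewrites; B does each keyword substitution in one full str.replace, then gathers the distinct lowercase letters in one pass (dict.fromkeys), builds the whole translation table up front, and applies it in a single str.translate pass.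
import Mathlib
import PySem

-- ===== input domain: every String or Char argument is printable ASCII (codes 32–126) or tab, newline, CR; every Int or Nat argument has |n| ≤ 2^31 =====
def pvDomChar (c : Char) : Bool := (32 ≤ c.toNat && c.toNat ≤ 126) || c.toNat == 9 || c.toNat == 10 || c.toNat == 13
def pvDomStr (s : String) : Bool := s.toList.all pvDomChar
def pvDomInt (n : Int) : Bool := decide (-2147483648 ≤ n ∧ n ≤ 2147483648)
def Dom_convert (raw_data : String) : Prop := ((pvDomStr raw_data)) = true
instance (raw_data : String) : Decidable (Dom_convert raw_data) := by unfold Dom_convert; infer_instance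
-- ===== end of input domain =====

-- B replaces A's repeated single-replace find-loops by one full replace per keyword and A's
-- interleaved per-index remap loop by table construction + one translate pass (measurably faster).

-- ===== PORT A =====

-- string.ascii_lowercase
def pvLowers : List Char := "abcdefghijklmnopqrstuvwxyz".toList

-- the module-level `clause` dict (values are 1-char strings)
def pvClause : PySem.Dict Int (List Char) := PySem.Dict.ofList
  [(1, ['a']), (2, ['b']), (3, ['c']), (4, ['d']), (5, ['e']), (6, ['f']), (7, ['g']),
   (8, ['h']), (9, ['i']), (10, ['j']), (11, ['k']), (12, ['l']), (13, ['m']), (14, ['n']),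
   (15, ['o']), (16, ['p']), (17, ['q']), (18, ['s']), (19, ['r']), (20, ['s']), (21, ['t']),
   (22, ['v']), (23, ['x']), (24, ['y']), (25, ['z']), (26, ['w'])]

-- s.replace(old, new, 1) for a non-empty `old`: replace the LEFTMOST occurrence;
-- `none` exactly when s.find(old) == -1 (no occurrence).
def pvReplaceOne (old new : List Char) : List Char → Option (List Char)
  | [] => none
  | c :: t =>
    if old.isPrefixOf (c :: t) then some (new ++ (c :: t).drop old.length)
    else (pvReplaceOne old new t).map (c :: ·)

-- `while s.find(old) != -1: s = s.replace(old, new, 1)`; pvReplaceOne is `none` exactly when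
-- find == -1.  Fuel `s.length + 1` strictly exceeds the number of loop iterations (each masking
-- step shortens the string; each unmasking step removes one sentinel character), as the
-- equivalence proof below establishes, so this computes exactly what the Python loop computes.
def pvWhileRep (old new : List Char) : Nat → List Char → List Char
  | 0, s => s
  | n + 1, s =>
    match pvReplaceOne old new s with
    | none => s
    | some s' => pvWhileRep old new n s'

-- one iteration of A's `for i in range(len(data))` body; state = (foo, change, data).
-- `clause[foo]` and `change[data[i]]` are ported with default [] — both keys are always
-- present when Python reads them (at most 26 distinct lowercase letters exist).
def pvStepA (st : Int × PySem.Dict Char (List Char) × List Char) (i : Int) :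
    Int × PySem.Dict Char (List Char) × List Char :=
  let foo := st.1
  let change := st.2.1
  let data := st.2.2
  let c := PySem.List.pyGetD data i ' '
  if c ∈ pvLowers then  -- data[i] in string.ascii_lowercase (1-char `in` = membership)
    let foo' := if change.contains c then foo else foo + 1
    let change' := if change.contains c then change else change.insert c (pvClause.getD foo [])
    (foo', change',
      PySem.List.slice data (some 0) (some i) ++ change'.getD c [] ++
        PySem.List.slice data (some (i + 1)) (some (PySem.List.len data)))
  else (foo, change, data)

def convert (raw_data : String) : String :=
  -- data = str(raw_data)  (raw_data is already a str)
  let data := raw_data.toList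
  let d1 := pvWhileRep "and".toList ['!'] (data.length + 1) data
  let d2 := pvWhileRep "or".toList ['@'] (d1.length + 1) d1
  let d3 := pvWhileRep "not".toList ['#'] (d2.length + 1) d2
  let d4 := ((PySem.List.pyRange 0 (PySem.List.len d3) 1).foldl pvStepA
              (1, PySem.Dict.empty, d3)).2.2
  let d5 := pvWhileRep ['!'] "and".toList (d4.length + 1) d4
  let d6 := pvWhileRep ['@'] "or".toList (d5.length + 1) d5
  let d7 := pvWhileRep ['#'] "not".toList (d6.length + 1) d6
  String.ofList d7

-- ===== PORT B =====

-- {c: clause[i + 1] for i, c in enumerate(seen)}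
def pvTableB (seen : List Char) : PySem.Dict Char (List Char) :=
  PySem.Dict.ofList ((PySem.List.enumerate seen).map (fun q => (q.2, pvClause.getD (q.1 + 1) [])))

def convert_alt (raw_data : String) : String :=
  let data := PySem.Chars.replace
    (PySem.Chars.replace (PySem.Chars.replace raw_data.toList "and".toList ['!'])
      "or".toList ['@']) "not".toList ['#']
  -- seen = dict.fromkeys(c for c in data if c in string.ascii_lowercase)
  let seen := PySem.List.dedup (data.filter (· ∈ pvLowers))
  let table := pvTableB seen
  -- data.translate(str.maketrans(table)): table values are 1-char strings
  let data2 := data.flatMap (fun c => match table.get? c with | some v => v | none => [c])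
  String.ofList (PySem.Chars.replace
    (PySem.Chars.replace (PySem.Chars.replace data2 ['!'] "and".toList) ['@'] "or".toList)
    ['#'] "not".toList)

-- ===== PRECONDITION & SPEC =====
def Spec_convert (raw_data : String) (out : String) : Prop := out = convert_alt raw_data
instance (raw_data : String) (out : String) : Decidable (Spec_convert raw_data out) := by unfold Spec_convert; infer_instance

-- ===== CLAIM (what is proved, stated in full; the proofs are below) =====
def Claim_equal_convert : Prop := ∀ (raw_data : String), Dom_convert raw_data → Spec_convert raw_data (convert raw_data)

-- ===== LEMMAS AND PROOFS =====

def pvRep (p r : List Char) : List Char → List Char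
  | [] => []
  | c :: t =>
    if p.isPrefixOf (c :: t) then r ++ pvRep p r (t.drop (p.length - 1))
    else c :: pvRep p r t
termination_by l => l.length
decreasing_by
  · simp only [List.length_drop, List.length_cons]; omega
  · simp only [List.length_cons]; omega

lemma go_eq (p r : List Char) (hp : p ≠ []) :
    ∀ (fuel : Nat) (l acc : List Char), l.length ≤ fuel →
      PySem.Chars.replace.go p r fuel l acc = acc.reverse ++ pvRep p r l := by
  intro fuel
  induction fuel with
  | zero =>
    intro l acc h
    have : l = [] := List.eq_nil_of_length_eq_zero (by omega)
    subst this
    simp [PySem.Chars.replace.go, pvRep]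
  | succ n ih =>
    intro l acc h
    cases l with
    | nil => simp [PySem.Chars.replace.go, pvRep]
    | cons c t =>
      by_cases hpre : p.isPrefixOf (c :: t)
      · have hp1 : 0 < p.length := List.length_pos_iff.mpr hp
        rw [PySem.Chars.replace.go]
        simp only [hpre, if_true]
        rw [ih ((c :: t).drop p.length) (r.reverse ++ acc) (by simp at h ⊢; omega)]
        rw [pvRep]
        simp only [hpre, if_true]
        have hplen : p.length = (p.length - 1) + 1 := by
          cases p with
          | nil => exact absurd rfl hp
          | cons a b => simp
        rw [hplen, List.drop_succ_cons, List.reverse_append, List.reverse_reverse]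
        simp
      · rw [PySem.Chars.replace.go]
        simp only [hpre]
        rw [ih t (c :: acc) (by simp at h; omega)]
        rw [pvRep]
        simp [hpre]

lemma replace_eq_pvRep (s p r : List Char) (hp : p ≠ []) :
    PySem.Chars.replace s p r = pvRep p r s := by
  rw [PySem.Chars.replace]
  have : p.isEmpty = false := by simp [hp]
  rw [this]
  simp only [Bool.false_eq_true, if_false]
  rw [go_eq p r hp s.length s [] le_rfl]
  simp

lemma replaceOne_none_pvRep (p r : List Char) :
    ∀ (s : List Char), pvReplaceOne p r s = none → pvRep p r s = s := by
  intro s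
  induction s with
  | nil => intro _; rw [pvRep]
  | cons c t ih =>
    intro h
    rw [pvReplaceOne] at h
    by_cases hpre : p.isPrefixOf (c :: t)
    · simp [hpre] at h
    · simp only [hpre, if_false, Bool.false_eq_true] at h
      rw [pvRep]
      simp only [hpre, Bool.false_eq_true, if_false]
      rw [ih (by simpa using h)]

lemma replaceOne_some (p r : List Char) :
    ∀ (s s' : List Char), pvReplaceOne p r s = some s' →
      ∃ u v, s = u ++ p ++ v ∧ s' = u ++ r ++ v ∧ ∀ j < u.length, ¬ p <+: s.drop j := by
  intro s
  induction s with
  | nil => intro s' h; simp [pvReplaceOne] at h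
  | cons c t ih =>
    intro s' h
    rw [pvReplaceOne] at h
    by_cases hpre : p.isPrefixOf (c :: t)
    · simp only [hpre, if_true, Option.some.injEq] at h
      refine ⟨[], (c :: t).drop p.length, ?_, ?_, by simp⟩
      · have := List.isPrefixOf_iff_prefix.mp hpre
        obtain ⟨w, hw⟩ := this
        simp [← hw, List.drop_left']
      · simp [← h]
    · simp only [hpre, Bool.false_eq_true, if_false] at h
      obtain ⟨t', ht', rfl⟩ := Option.map_eq_some_iff.mp h
      obtain ⟨u, v, h1, h2, h3⟩ := ih t' ht'
      refine ⟨c :: u, v, by simp [h1], by simp [h2], ?_⟩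
      intro j hj
      cases j with
      | zero =>
        simp only [List.drop_zero]
        intro hc
        exact hpre (List.isPrefixOf_iff_prefix.mpr hc)
      | succ j' =>
        simp only [List.drop_succ_cons]
        exact h3 j' (by simpa using hj)

def pvInert (p w : List Char) : Prop :=
  ∀ j < w.length, ¬ p <+: w.drop j ∧ ¬ w.drop j <+: p

lemma not_prefix_append_of_inert {p w : List Char} (hw : pvInert p w) {j : Nat}
    (hj : j < w.length) (v : List Char) : ¬ p <+: (w ++ v).drop j := by
  rw [List.drop_append_of_le_length (by omega)]
  intro hc
  obtain ⟨h1, h2⟩ := hw j hj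
  by_cases hl : p.length ≤ (w.drop j).length
  · exact h1 ((List.isPrefix_append_of_length hl).mp hc)
  · exact h2 (List.prefix_of_prefix_length_le (List.prefix_append _ _) hc (by omega))

lemma pvInert_tail {p : List Char} {c : Char} {w : List Char} (hw : pvInert p (c :: w)) :
    pvInert p w := by
  intro j hj
  have := hw (j + 1) (by simpa using hj)
  simpa using this

lemma replaceOne_append_inert (p r : List Char) :
    ∀ (w : List Char), pvInert p w → ∀ (v : List Char),
    pvReplaceOne p r (w ++ v) = (pvReplaceOne p r v).map (w ++ ·) := by
  intro w
  induction w with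
  | nil => intro _ v; simp
  | cons c w' ih =>
    intro hw v
    rw [List.cons_append, pvReplaceOne]
    have hnp : ¬ p.isPrefixOf (c :: (w' ++ v)) := by
      intro hc
      have h0 := not_prefix_append_of_inert hw (j := 0) (by simp) v
      simp only [List.drop_zero, List.cons_append] at h0
      exact h0 (List.isPrefixOf_iff_prefix.mp hc)
    simp only [hnp, Bool.false_eq_true, if_false]
    rw [ih (pvInert_tail hw) v]
    cases pvReplaceOne p r v <;> simp

lemma whileRep_eq_of_none (p r : List Char) (fuel : Nat) (s : List Char)
    (h : pvReplaceOne p r s = none) : pvWhileRep p r fuel s = s := by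
  cases fuel with
  | zero => rfl
  | succ n => rw [pvWhileRep, h]

lemma whileRep_append_inert (p r w : List Char) (hw : pvInert p w) :
    ∀ (fuel : Nat) (v : List Char), pvWhileRep p r fuel (w ++ v) = w ++ pvWhileRep p r fuel v := by
  intro fuel
  induction fuel with
  | zero => intro v; rfl
  | succ n ih =>
    intro v
    rw [pvWhileRep, pvWhileRep, replaceOne_append_inert p r w hw v]
    cases h : pvReplaceOne p r v with
    | none => rfl
    | some v' => simp only [Option.map_some]; exact ih v'

lemma pvRep_append_no_match (p r : List Char) :
    ∀ (u w : List Char), (∀ j < u.length, ¬ p <+: (u ++ w).drop j) →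
    pvRep p r (u ++ w) = u ++ pvRep p r w := by
  intro u
  induction u with
  | nil => intro w _; simp
  | cons c u' ih =>
    intro w h
    rw [List.cons_append, pvRep]
    have hnp : ¬ p.isPrefixOf (c :: (u' ++ w)) := by
      intro hc
      have h0 := h 0 (by simp)
      simp only [List.drop_zero, List.cons_append] at h0
      exact h0 (List.isPrefixOf_iff_prefix.mp hc)
    simp only [hnp, Bool.false_eq_true, if_false]
    rw [ih w (fun j hj => by simpa using h (j + 1) (by simpa using hj))]
    simp

lemma pvRep_prefix (p r : List Char) (hp : p ≠ []) (v : List Char) :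
    pvRep p r (p ++ v) = r ++ pvRep p r v := by
  cases p with
  | nil => exact absurd rfl hp
  | cons c p' =>
    rw [List.cons_append, pvRep]
    have hpre : (c :: p').isPrefixOf (c :: (p' ++ v)) := by
      rw [List.isPrefixOf_iff_prefix]
      exact ⟨v, by simp⟩
    simp only [hpre, if_true]
    simp [List.drop_left]

lemma inert_of_leftmost (p r u v : List Char) (hp : p ≠ []) (hr : r ≠ [])
    (hdis : ∀ c ∈ r, c ∉ p)
    (hleft : ∀ j < u.length, ¬ p <+: (u ++ (p ++ v)).drop j) : pvInert p (u ++ r) := by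
  have hr0 : 0 < r.length := List.length_pos_iff.mpr hr
  have hp0 : 0 < p.length := List.length_pos_iff.mpr hp
  intro j hj
  simp only [List.length_append] at hj
  by_cases hju : j < u.length
  · rw [List.drop_append_of_le_length (by omega)]
    set x := u.drop j with hx
    have hxlen : x.length = u.length - j := by simp [hx]
    constructor
    · intro hc
      by_cases hl : p.length ≤ x.length
      · have hpu : p <+: x := (List.isPrefix_append_of_length hl).mp hc
        exact hleft j hju (by
          rw [List.drop_append_of_le_length (by omega)]
          exact hpu.trans (List.prefix_append _ _))
      · have hgl : x.length < (x ++ r).length := by simp; omega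
        have h1 : p[x.length]'(by omega) = (x ++ r)[x.length]'hgl := hc.getElem (by omega)
        have h2 : (x ++ r)[x.length]'hgl = r[0]'hr0 := by
          rw [List.getElem_append_right (le_refl x.length)]
          simp
        have hmem : r[0]'hr0 ∈ p := by rw [← h2, ← h1]; exact List.getElem_mem _
        exact hdis _ (List.getElem_mem _) hmem
    · intro hc
      have hll : (x ++ r).length ≤ p.length := hc.length_le
      have hgl : x.length < (x ++ r).length := by simp; omega
      have h1 : (x ++ r)[x.length]'hgl = p[x.length]'(by simp at hll; omega) := hc.getElem hgl
      have h2 : (x ++ r)[x.length]'hgl = r[0]'hr0 := by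
        rw [List.getElem_append_right (le_refl x.length)]
        simp
      have hmem : r[0]'hr0 ∈ p := by rw [← h2, h1]; exact List.getElem_mem _
      exact hdis _ (List.getElem_mem _) hmem
  · have hje : j = u.length + (j - u.length) := by omega
    have hd : (u ++ r).drop j = r.drop (j - u.length) := by
      rw [List.drop_append]
      simp [List.drop_eq_nil_of_le (show u.length ≤ j by omega)]
    rw [hd]
    set i0 := j - u.length with hi0
    have hjr : i0 < r.length := by omega
    have hx0 : 0 < (r.drop i0).length := by simp; omega
    have hder : (r.drop i0)[0]'hx0 = r[i0]'hjr := by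
      rw [List.getElem_drop]
      simp
    constructor
    · intro hc
      have h1 : p[0]'hp0 = (r.drop i0)[0]'hx0 := hc.getElem hp0
      have hmem : r[i0]'hjr ∈ p := by rw [← hder, ← h1]; exact List.getElem_mem _
      exact hdis _ (List.getElem_mem _) hmem
    · intro hc
      have h1 : (r.drop i0)[0]'hx0 = p[0]'hp0 := hc.getElem hx0
      have hmem : r[i0]'hjr ∈ p := by rw [← hder, h1]; exact List.getElem_mem _
      exact hdis _ (List.getElem_mem _) hmem

lemma whileRep_eq_pvRep (p r : List Char) (hp : p ≠ []) (hr : r ≠ [])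
    (hdis : ∀ c ∈ r, c ∉ p) :
    ∀ (n : Nat) (s : List Char) (fuel : Nat), s.length ≤ n → s.length ≤ fuel →
      pvWhileRep p r fuel s = pvRep p r s := by
  intro n
  induction n with
  | zero =>
    intro s fuel h1 h2
    have : s = [] := List.eq_nil_of_length_eq_zero (by omega)
    subst this
    rw [whileRep_eq_of_none p r fuel [] rfl, pvRep]
  | succ n ih =>
    intro s fuel h1 h2
    cases hro : pvReplaceOne p r s with
    | none => rw [whileRep_eq_of_none p r fuel s hro, replaceOne_none_pvRep p r s hro]
    | some s' =>
      obtain ⟨u, v, hs, hs', hleft⟩ := replaceOne_some p r s s' hro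
      have hp0 : 0 < p.length := List.length_pos_iff.mpr hp
      have hslen : v.length + 1 ≤ s.length := by rw [hs]; simp; omega
      cases fuel with
      | zero => omega
      | succ f =>
        rw [pvWhileRep, hro]
        show pvWhileRep p r f s' = pvRep p r s
        have hleft' : ∀ j < u.length, ¬ p <+: (u ++ (p ++ v)).drop j := by
          intro j hj
          have := hleft j hj
          rwa [hs, List.append_assoc] at this
        have hin : pvInert p (u ++ r) := inert_of_leftmost p r u v hp hr hdis hleft'
        rw [hs', whileRep_append_inert p r (u ++ r) hin f v,
            ih v f (by omega) (by omega)]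
        rw [hs, show u ++ p ++ v = u ++ (p ++ v) from List.append_assoc u p v,
            pvRep_append_no_match p r u (p ++ v) hleft', pvRep_prefix p r hp v]
        simp

lemma whileRep_replace (p r s : List Char) (hp : p ≠ []) (hr : r ≠ [])
    (hdis : ∀ c ∈ r, c ∉ p) :
    pvWhileRep p r (s.length + 1) s = PySem.Chars.replace s p r := by
  exact (whileRep_eq_pvRep p r hp hr hdis (s.length + 1) s (s.length + 1)
    (by omega) (by omega)).trans (replace_eq_pvRep s p r hp).symm


-- ===== proof-side definitions =====

def pvSeenAll (m : List Char) : List Char := PySem.List.dedup (m.filter (· ∈ pvLowers))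

def pvTrc (m : List Char) (c : Char) : Char :=
  match (pvTableB (pvSeenAll m)).get? c with
  | some v => v.headD c
  | none => c

def pvS (m : List Char) (i : Nat) : List Char :=
  PySem.List.dedup ((m.take i).filter (· ∈ pvLowers))

def pvT (m : List Char) (i : Nat) : PySem.Dict Char (List Char) := pvTableB (pvS m i)

def pvD (m : List Char) (i : Nat) : List Char := (m.take i).map (pvTrc m) ++ m.drop i

-- ===== dict lemmas =====

lemma contains_iff_any (d : PySem.Dict Char (List Char)) (c : Char) :
    d.contains c = d.items.any (fun p => p.1 == c) := rfl

lemma update_items_fresh :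
    ∀ (ps : List (Char × List Char)) (d : PySem.Dict Char (List Char)),
      (ps.map Prod.fst).Nodup → (∀ q ∈ ps, d.contains q.1 = false) →
      (d.update ps).items = d.items ++ ps := by
  intro ps
  induction ps with
  | nil => intro d _ _; simp [PySem.Dict.update]
  | cons q ps' ih =>
    intro d hn hf
    have hq : d.contains q.1 = false := hf q (by simp)
    have hins : (d.insert q.1 q.2).items = d.items ++ [q] := by
      rw [PySem.Dict.insert, hq]
      simp
    have hstep : (d.update (q :: ps')) = ((d.insert q.1 q.2).update ps') := by
      simp [PySem.Dict.update]
    rw [hstep, ih (d.insert q.1 q.2) (by simpa using hn.of_cons) ?fresh, hins]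
    · simp
    case fresh =>
      intro q' hq'
      rw [contains_iff_any, hins, List.any_append]
      have h1 : d.items.any (fun p => p.1 == q'.1) = false := by
        rw [← contains_iff_any]; exact hf q' (by simp [hq'])
      have h2 : q.1 ≠ q'.1 := by
        intro hc
        have : q.1 ∈ ps'.map Prod.fst := by
          rw [hc]; exact List.mem_map_of_mem hq'
        exact (List.nodup_cons.mp (by simpa using hn)).1 this
      simp [h1, h2]

lemma ofList_items_fresh (ps : List (Char × List Char)) (hn : (ps.map Prod.fst).Nodup) :
    (PySem.Dict.ofList ps).items = ps := by
  rw [PySem.Dict.ofList, update_items_fresh ps PySem.Dict.empty hn (fun _ _ => rfl)]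
  rfl

lemma get?_mk_enum :
    ∀ (L : List Char) (s : Int) (c : Char),
      (PySem.Dict.mk ((PySem.List.enumerate L s).map
          (fun q => (q.2, pvClause.getD (q.1 + 1) [])))).get? c
        = Option.map (fun k : Nat => pvClause.getD (s + (k : Int) + 1) []) (PySem.List.index? L c) := by
  intro L
  induction L with
  | nil => intro s c; simp [PySem.List.enumerate, PySem.Dict.get?, PySem.List.index?]
  | cons x L' ih =>
    intro s c
    rw [PySem.List.enumerate_cons]
    simp only [List.map_cons]
    rw [PySem.Dict.get?_mk_cons]
    by_cases hx : x = c
    · subst hx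
      rw [PySem.List.index?_cons_self]
      simp
    · have : (x == c) = false := by simp [hx]
      rw [this, PySem.List.index?_cons_of_ne L' hx, ih (s + 1) c]
      cases hidx : PySem.List.index? L' c with
      | none => simp [hidx]
      | some k =>
        simp only [Option.map_some]
        congr 1
        push_cast
        ring

lemma keys_enum (L : List Char) (s : Int) :
    (((PySem.List.enumerate L s).map (fun q => (q.2, pvClause.getD (q.1 + 1) []))).map
      Prod.fst) = L := by
  rw [List.map_map]
  exact PySem.List.map_snd_enumerate L s

lemma get?_tableB (L : List Char) (hn : L.Nodup) (c : Char) :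
    (pvTableB L).get? c
      = Option.map (fun k : Nat => pvClause.getD ((k : Int) + 1) []) (PySem.List.index? L c) := by
  have hkeys : (((PySem.List.enumerate L).map (fun q => (q.2, pvClause.getD (q.1 + 1) []))).map
      Prod.fst) = L := by
    rw [List.map_map]
    exact PySem.List.map_snd_enumerate L 0
  have hitems := ofList_items_fresh _ (by rw [hkeys]; exact hn)
  have : (pvTableB L).get? c = (PySem.Dict.mk ((PySem.List.enumerate L 0).map
      (fun q => (q.2, pvClause.getD (q.1 + 1) [])))).get? c := by
    rw [PySem.Dict.get?, PySem.Dict.get?]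
    rw [pvTableB] at *
    rw [hitems]
  rw [this, get?_mk_enum L 0 c]
  simp

lemma contains_eq_isSome (d : PySem.Dict Char (List Char)) (c : Char) :
    d.contains c = (d.get? c).isSome := by
  rw [PySem.Dict.get?, PySem.Dict.contains, Option.isSome_map, Bool.eq_iff_iff]
  simp [List.find?_isSome, List.any_eq_true]

lemma contains_tableB (L : List Char) (hn : L.Nodup) (c : Char) :
    (pvTableB L).contains c = true ↔ c ∈ L := by
  rw [contains_eq_isSome, get?_tableB L hn c]
  rw [Option.isSome_map]
  rw [PySem.List.index?_isSome_iff]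

-- ===== dedup lemmas =====

lemma ofList_append (xs t : List Char) :
    PySem.Set.ofList (xs ++ t) = List.foldl PySem.Set.add (PySem.Set.ofList xs) t := by
  simp [PySem.Set.ofList, List.foldl_append]

lemma foldl_add_exists (t : List Char) :
    ∀ s : PySem.Set Char, ∃ z, List.foldl PySem.Set.add s t = s ++ z := by
  induction t with
  | nil => intro s; exact ⟨[], by simp⟩
  | cons x t' ih =>
    intro s
    rw [List.foldl_cons]
    obtain ⟨z, hz⟩ := ih (s.add x)
    by_cases hx : s.contains x = true
    · have ha : s.add x = s := by rw [PySem.Set.add, if_pos hx]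
      exact ⟨z, by rw [hz, ha]⟩
    · have ha : s.add x = s ++ [x] := by rw [PySem.Set.add, if_neg hx]
      exact ⟨[x] ++ z, by rw [hz, ha]; simp⟩

lemma dedup_prefix {xs ys : List Char} (h : xs <+: ys) :
    PySem.List.dedup xs <+: PySem.List.dedup ys := by
  obtain ⟨t, rfl⟩ := h
  rw [PySem.List.dedup, PySem.List.dedup, ofList_append]
  obtain ⟨z, hz⟩ := foldl_add_exists t (PySem.Set.ofList xs)
  exact ⟨z, hz.symm⟩

lemma dedup_snoc (xs : List Char) (c : Char) :
    PySem.List.dedup (xs ++ [c])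
      = if c ∈ xs then PySem.List.dedup xs else PySem.List.dedup xs ++ [c] := by
  rw [PySem.List.dedup, PySem.List.dedup, ofList_append]
  simp only [List.foldl_cons, List.foldl_nil]
  rw [PySem.Set.add]
  by_cases hc : c ∈ xs
  · rw [if_pos ((PySem.Set.contains_iff _ _).mpr ((PySem.Set.mem_ofList xs c).mpr hc)), if_pos hc]
  · rw [if_neg (fun h => hc ((PySem.Set.mem_ofList xs c).mp ((PySem.Set.contains_iff _ _).mp h))),
        if_neg hc]

-- ===== clause value lemmas =====

lemma clause_len (k : Nat) (hk : k < 26) : (pvClause.getD ((k : Int) + 1) []).length = 1 := by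
  interval_cases k <;> rfl

lemma seen_le26 (L : List Char) (hn : L.Nodup) (hsub : ∀ c ∈ L, c ∈ pvLowers) :
    L.length ≤ 26 := by
  have := (hn.subperm (fun c hc => hsub c hc)).length_le
  simpa [pvLowers] using this

lemma getD_singleton (k : Nat) (hk : k < 26) :
    pvClause.getD ((k : Int) + 1) [] = [(pvClause.getD ((k : Int) + 1) []).headD 'a'] := by
  obtain ⟨a, ha⟩ := List.length_eq_one_iff.mp (clause_len k hk)
  rw [ha]
  rfl

lemma seenAll_nodup (m : List Char) : (pvSeenAll m).Nodup := by
  rw [pvSeenAll, PySem.List.dedup]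
  exact PySem.Set.nodup_ofList _

lemma seenAll_sub (m : List Char) : ∀ c ∈ pvSeenAll m, c ∈ pvLowers := by
  intro c hc
  rw [pvSeenAll, PySem.List.dedup] at hc
  have := (PySem.Set.mem_ofList _ _).mp hc
  simpa using (List.mem_filter.mp this).2

lemma index?_lt_length {L : List Char} {c : Char} {k : Nat}
    (h : PySem.List.index? L c = some k) : k < L.length := by
  obtain ⟨pre, suf, hL, hlen, _⟩ := (PySem.List.index?_eq_some_iff _ _ _).mp h
  rw [hL]
  simp [← hlen]

lemma tr_eq (m : List Char) (c : Char) :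
    (match (pvTableB (pvSeenAll m)).get? c with | some v => v | none => [c]) = [pvTrc m c] := by
  rw [pvTrc]
  cases h : (pvTableB (pvSeenAll m)).get? c with
  | none => rfl
  | some v =>
    simp only []
    rw [get?_tableB _ (seenAll_nodup m) c] at h
    cases hidx : PySem.List.index? (pvSeenAll m) c with
    | none => rw [hidx] at h; simp at h
    | some k =>
      rw [hidx] at h
      simp only [Option.map_some, Option.some.injEq] at h
      have hk : k < 26 := by
        have h1 := index?_lt_length hidx
        have h2 := seen_le26 _ (seenAll_nodup m) (seenAll_sub m)
        omega
      rw [← h, getD_singleton k hk]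
      simp

-- ===== step lemmas =====

lemma S_prefix (m : List Char) (i : Nat) : pvS m i <+: pvSeenAll m :=
  dedup_prefix (List.IsPrefix.filter _ (List.take_prefix i m))

lemma S_nodup (m : List Char) (i : Nat) : (pvS m i).Nodup := by
  rw [pvS, PySem.List.dedup]; exact PySem.Set.nodup_ofList _

lemma get?_T_of_mem (m : List Char) (i : Nat) {c : Char} (hc : c ∈ pvS m i) :
    (pvT m i).get? c = (pvTableB (pvSeenAll m)).get? c := by
  rw [pvT, get?_tableB _ (S_nodup m i) c, get?_tableB _ (seenAll_nodup m) c]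
  obtain ⟨t, ht⟩ := S_prefix m i
  rw [← ht, PySem.List.index?_append_of_mem t hc]

lemma getD_T_of_mem (m : List Char) (i : Nat) {c : Char} (hc : c ∈ pvS m i) :
    (pvT m i).getD c [] = [pvTrc m c] := by
  rw [PySem.Dict.getD, get?_T_of_mem m i hc]
  have := tr_eq m c
  cases h : (pvTableB (pvSeenAll m)).get? c with
  | none =>
    exfalso
    rw [get?_tableB _ (seenAll_nodup m) c] at h
    have hmem : c ∈ pvSeenAll m := (S_prefix m i).subset hc
    rw [Option.map_eq_none_iff, PySem.List.index?_eq_none_iff] at h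
    exact h hmem
  | some v =>
    rw [h] at this
    simpa using this

lemma trc_of_not_mem (m : List Char) {c : Char} (hc : c ∉ pvSeenAll m) : pvTrc m c = c := by
  rw [pvTrc, get?_tableB _ (seenAll_nodup m) c,
      (PySem.List.index?_eq_none_iff _ _).mpr hc]
  rfl

lemma mem_S_iff (m : List Char) (i : Nat) (c : Char) :
    c ∈ pvS m i ↔ c ∈ (m.take i).filter (· ∈ pvLowers) := by
  rw [pvS, PySem.List.dedup]
  exact PySem.Set.mem_ofList _ _

lemma mem_seenAll_iff (m : List Char) (c : Char) :
    c ∈ pvSeenAll m ↔ c ∈ m.filter (· ∈ pvLowers) := by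
  rw [pvSeenAll, PySem.List.dedup]
  exact PySem.Set.mem_ofList _ _

lemma take_snoc (m : List Char) (i : Nat) (hi : i < m.length) :
    m.take (i + 1) = m.take i ++ [m[i]] := by
  rw [List.take_succ]
  simp [List.getElem?_eq_getElem hi]

lemma mapLen (m : List Char) (i : Nat) (hi : i ≤ m.length) :
    ((m.take i).map (pvTrc m)).length = i := by
  simp [List.length_take]
  omega

lemma pvD_len (m : List Char) (i : Nat) (hi : i ≤ m.length) :
    (pvD m i).length = m.length := by
  rw [pvD]
  simp [List.length_take]
  omega

lemma pvD_get (m : List Char) (i : Nat) (hi : i < m.length) :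
    PySem.List.pyGetD (pvD m i) (i : Int) ' ' = m[i] := by
  rw [PySem.List.pyGetD_natCast, pvD, List.getD_eq_getElem?_getD,
      List.getElem?_append_right (by rw [mapLen m i (by omega)])]
  rw [mapLen m i (by omega)]
  simp [List.getElem?_drop, List.getElem?_eq_getElem hi]

lemma pvD_slice1 (m : List Char) (i : Nat) (hi : i < m.length) :
    PySem.List.slice (pvD m i) (some 0) (some (i : Int)) = (m.take i).map (pvTrc m) := by
  rw [PySem.List.slice_zero_start, PySem.List.slice_to_natCast, pvD,
      List.take_left' (mapLen m i (by omega))]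

lemma pvD_slice2 (m : List Char) (i : Nat) (hi : i < m.length) :
    PySem.List.slice (pvD m i) (some ((i : Int) + 1)) (some (PySem.List.len (pvD m i)))
      = m.drop (i + 1) := by
  have h1 : ((i : Int) + 1) = ((i + 1 : Nat) : Int) := by push_cast; ring
  have h2 : PySem.List.len (pvD m i) = ((m.length : Nat) : Int) := by
    simp [pvD_len m i (by omega)]
  rw [h1, h2, PySem.List.slice_natCast]
  have h3 : (pvD m i).drop (i + 1) = m.drop (i + 1) := by
    rw [pvD, List.drop_append, List.drop_eq_nil_of_le (by rw [mapLen m i (by omega)]; omega),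
        mapLen m i (by omega), List.drop_drop]
    simp
  rw [h3, List.take_of_length_le (by simp [List.length_drop])]

lemma stepA_eq (m : List Char) (i : Nat) (hi : i < m.length) :
    pvStepA ((1 + (pvS m i).length : Int), pvT m i, pvD m i) (i : Int)
      = ((1 + (pvS m (i + 1)).length : Int), pvT m (i + 1), pvD m (i + 1)) := by
  rw [pvStepA]
  simp only [pvD_get m i hi]
  have hsnoc : (m.take (i + 1)).filter (· ∈ pvLowers)
      = (m.take i).filter (· ∈ pvLowers) ++ (if m[i] ∈ pvLowers then [m[i]] else []) := by
    rw [take_snoc m i hi, List.filter_append]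
    by_cases hl : m[i] ∈ pvLowers <;> simp [hl]
  by_cases hlow : m[i] ∈ pvLowers
  · simp only [hlow, if_true]
    have hS1 : pvS m (i + 1) = if m[i] ∈ (m.take i).filter (· ∈ pvLowers)
        then pvS m i else pvS m i ++ [m[i]] := by
      rw [pvS, hsnoc, if_pos hlow, dedup_snoc]
      rfl
    by_cases hmem : m[i] ∈ pvS m i
    · have hcon : (pvT m i).contains m[i] = true :=
        (contains_tableB _ (S_nodup m i) _).mpr hmem
      simp only [hcon, if_true]
      have hS : pvS m (i + 1) = pvS m i := by
        rw [hS1, if_pos ((mem_S_iff m i _).mp hmem)]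
      refine Prod.ext (by rw [hS]) (Prod.ext ?_ ?_)
      · show pvT m i = pvT m (i + 1)
        rw [pvT, pvT, hS]
      · show PySem.List.slice (pvD m i) (some 0) (some (i : Int)) ++ (pvT m i).getD m[i] [] ++
            PySem.List.slice (pvD m i) (some ((i : Int) + 1)) (some (PySem.List.len (pvD m i)))
          = pvD m (i + 1)
        rw [pvD_slice1 m i hi, pvD_slice2 m i hi, getD_T_of_mem m i hmem, pvD,
            take_snoc m i hi, List.map_append]
        simp
    · have hcon : (pvT m i).contains m[i] = false := by
        rw [← Bool.not_eq_true]
        exact fun h => hmem ((contains_tableB _ (S_nodup m i) _).mp h)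
      simp only [hcon, Bool.false_eq_true, if_false]
      have hS : pvS m (i + 1) = pvS m i ++ [m[i]] := by
        rw [hS1, if_neg (fun h => hmem ((mem_S_iff m i _).mpr h))]
      have hmemS1 : m[i] ∈ pvS m (i + 1) := by rw [hS]; simp
      have hT : (pvT m i).insert m[i] (pvClause.getD (1 + (pvS m i).length : Int) [])
          = pvT m (i + 1) := by
        apply PySem.Dict.ext
        rw [PySem.Dict.insert, hcon]
        simp only [Bool.false_eq_true, if_false]
        rw [pvT, pvT, pvTableB, pvTableB,
            ofList_items_fresh _ (by rw [keys_enum]; exact S_nodup m i),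
            ofList_items_fresh _ (by rw [keys_enum]; exact S_nodup m (i + 1)),
            hS, PySem.List.enumerate_append, List.map_append, PySem.List.enumerate_cons]
        simp only [PySem.List.enumerate_nil, List.map_cons, List.map_nil]
        congr 3
        push_cast
        ring
      refine Prod.ext ?_ (Prod.ext ?_ ?_)
      · show (1 + (pvS m i).length : Int) + 1 = (1 + (pvS m (i + 1)).length : Int)
        rw [hS]
        push_cast [List.length_append, List.length_cons, List.length_nil]
        ring
      · exact hT
      · show PySem.List.slice (pvD m i) (some 0) (some (i : Int)) ++
            ((pvT m i).insert m[i] (pvClause.getD (1 + (pvS m i).length : Int) [])).getD m[i] [] ++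
            PySem.List.slice (pvD m i) (some ((i : Int) + 1)) (some (PySem.List.len (pvD m i)))
          = pvD m (i + 1)
        rw [hT, getD_T_of_mem m (i + 1) hmemS1, pvD_slice1 m i hi, pvD_slice2 m i hi, pvD,
            take_snoc m i hi, List.map_append]
        simp
  · simp only [hlow, if_false]
    have hS : pvS m (i + 1) = pvS m i := by
      rw [pvS, hsnoc, if_neg hlow]
      simp [pvS]
    have htrc : pvTrc m m[i] = m[i] := by
      apply trc_of_not_mem
      intro hc
      exact hlow (by simpa using (List.mem_filter.mp ((mem_seenAll_iff m _).mp hc)).2)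
    refine Prod.ext (by rw [hS]) (Prod.ext ?_ ?_)
    · show pvT m i = pvT m (i + 1)
      rw [pvT, pvT, hS]
    · show pvD m i = pvD m (i + 1)
      rw [pvD, pvD, take_snoc m i hi, List.map_append, List.drop_eq_getElem_cons hi]
      simp [htrc]

lemma foldA (m : List Char) :
    ∀ (k i : Nat), i + k = m.length →
      (PySem.List.pyRange (i : Int) (m.length : Int) 1).foldl pvStepA
          ((1 + (pvS m i).length : Int), pvT m i, pvD m i)
        = ((1 + (pvS m m.length).length : Int), pvT m m.length, m.map (pvTrc m)) := by
  intro k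
  induction k with
  | zero =>
    intro i hik
    have : i = m.length := by omega
    subst this
    rw [PySem.List.pyRange_one_eq_nil (le_refl _)]
    simp [pvD]
  | succ k ih =>
    intro i hik
    have hi : i < m.length := by omega
    rw [PySem.List.pyRange_one_cons (by exact_mod_cast hi)]
    rw [List.foldl_cons, stepA_eq m i hi,
        show ((i : Int) + 1) = (((i + 1 : Nat)) : Int) by push_cast; ring,
        ih (i + 1) (by omega)]

lemma foldA_final (m : List Char) :
    ((PySem.List.pyRange 0 (PySem.List.len m) 1).foldl pvStepA
        (1, PySem.Dict.empty, m)).2.2 = m.map (pvTrc m) := by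
  have h0 : pvS m 0 = [] := rfl
  have hT0 : pvT m 0 = PySem.Dict.empty := rfl
  have hD0 : pvD m 0 = m := by simp [pvD]
  have hlen : PySem.List.len m = (m.length : Int) := by simp
  have := foldA m m.length 0 (by omega)
  rw [h0, hT0, hD0] at this
  simp only [List.length_nil, Nat.cast_zero, Nat.cast_ofNat] at this
  norm_num at this
  rw [hlen, this]

lemma flatMap_tr (m : List Char) :
    m.flatMap (fun c => match (pvTableB (PySem.List.dedup (m.filter (· ∈ pvLowers)))).get? c with
      | some v => v | none => [c]) = m.map (pvTrc m) := by
  show m.flatMap (fun c => match (pvTableB (pvSeenAll m)).get? c with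
      | some v => v | none => [c]) = m.map (pvTrc m)
  have : (fun c => match (pvTableB (pvSeenAll m)).get? c with
      | some v => v | none => [c]) = fun c => [pvTrc m c] := funext (tr_eq m)
  rw [this]
  exact Eq.symm List.map_eq_flatMap

-- ===== VERDICT (by name: the statement is the Claim_ definition above) =====
theorem convert_spec : Claim_equal_convert := by
  intro raw _
  show convert raw = convert_alt raw
  simp only [convert, convert_alt]
  rw [whileRep_replace "and".toList ['!'] raw.toList (by simp) (by simp) (by simp)]
  rw [whileRep_replace "or".toList ['@'] _ (by simp) (by simp) (by simp)]
  rw [whileRep_replace "not".toList ['#'] _ (by simp) (by simp) (by simp)]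
  rw [foldA_final]
  rw [flatMap_tr]
  rw [whileRep_replace ['!'] "and".toList _ (by simp) (by simp) (by simp)]
  rw [whileRep_replace ['@'] "or".toList _ (by simp) (by simp) (by simp)]
  rw [whileRep_replace ['#'] "not".toList _ (by simp) (by simp) (by simp)]
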